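-- pv_equiv track=rewrite | github.com/glebzlat/multisip | multisip/baresip/manager.py | _extract_first_aor
-- ===== SOURCE A (Python) =====
-- from typing import Any, Optional
--
-- def _extract_first_aor(text: str) -> Optional[str]:
--     start = text.find("sip:")
--     if start < 0:
--         return None
--
--     end = len(text)
--     for sep in (" ", "\t", ">", "]", ";", ","):
--         pos = text.find(sep, start)
--         if pos >= 0:
--             end = min(end, pos)
--
--     return text[start:end]
-- ===== SOURCE B (Python) =====
-- from typing import Any, Optional
--
-- _SEPS = {" ", "\t", ">", "]", ";", ","}
--
-- def _extract_first_aor(text: str) -> Optional[str]: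
--     start = text.find("sip:")
--     if start < 0:
--         return None
--     for i in range(start, len(text)):
--         if text[i] in _SEPS:
--             return text[start:i]
--     return text[start:]
-- ===== Notes on version B (the rewrite author's own statement) =====
-- stated objective: simpler
-- what changed: Replaces the six repeated text.find(sep, start) scans plus a running minimum with a single character-by-character forward scan from start that returns at the first separator character.
import Mathlib
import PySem

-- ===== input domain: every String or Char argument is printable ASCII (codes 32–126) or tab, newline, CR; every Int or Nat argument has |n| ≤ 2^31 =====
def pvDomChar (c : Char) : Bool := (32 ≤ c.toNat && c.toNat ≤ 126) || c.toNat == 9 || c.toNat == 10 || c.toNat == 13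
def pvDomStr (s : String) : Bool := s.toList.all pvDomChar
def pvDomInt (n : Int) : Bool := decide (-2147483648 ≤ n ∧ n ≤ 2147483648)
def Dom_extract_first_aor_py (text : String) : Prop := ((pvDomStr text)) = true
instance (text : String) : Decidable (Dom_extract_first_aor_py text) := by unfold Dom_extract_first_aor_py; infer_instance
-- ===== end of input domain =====

-- B replaces A's six repeated find(sep, start) scans + running minimum by one forward
-- character scan from start that stops at the first separator (objective: simpler).

-- ===== PORT A =====
-- literal port of A: find "sip:", then fold over the six separator strings taking the
-- minimum found position, then text[start:end]
def extract_first_aor_py (text : String) : Option String :=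
  let start := PySem.Str.find text "sip:"
  if start < 0 then none
  else
    let endv := [" ", "\t", ">", "]", ";", ","].foldl
      (fun e sep =>
        let pos := PySem.Str.findFrom text sep start none
        if pos ≥ 0 then min e pos else e)
      (PySem.Str.len text)
    some (String.ofList (PySem.List.slice text.toList (some start) (some endv)))

-- ===== PORT B =====
def pvIsSep (c : Char) : Bool :=
  c = ' ' || c = '\t' || c = '>' || c = ']' || c = ';' || c = ','

-- B's loop: walk the characters after start, return the collected prefix at the first
-- separator; if none occurs, the whole rest (text[start:]) is returned
def pvScanB : List Char → List Char
  | [] => []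
  | c :: cs => if pvIsSep c then [] else c :: pvScanB cs

def extract_first_aor_py_alt (text : String) : Option String :=
  let start := PySem.Str.find text "sip:"
  if start < 0 then none
  else some (String.ofList (pvScanB (text.toList.drop start.toNat)))

-- ===== PRECONDITION & SPEC =====
def Spec_extract_first_aor_py (text : String) (out : Option String) : Prop := out = extract_first_aor_py_alt text
instance (text : String) (out : Option String) : Decidable (Spec_extract_first_aor_py text out) := by unfold Spec_extract_first_aor_py; infer_instance

-- ===== CLAIM (what is proved, stated in full; the proofs are below) =====
def Claim_equal_extract_first_aor_py : Prop := ∀ (text : String), Dom_extract_first_aor_py text → Spec_extract_first_aor_py text (extract_first_aor_py text)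

-- ===== LEMMAS AND PROOFS =====

-- the six separators, as characters, and A's running-minimum fold in relative coordinates
def pvSeps : List Char := [' ', '\t', '>', ']', ';', ',']

def pvStep (d : List Char) (e : Int) (c : Char) : Int :=
  let p := PySem.Chars.find d [c]
  if p ≥ 0 then min e p else e

def pvF (d : List Char) (e : Int) : Int :=
  pvSeps.foldl (pvStep d) e

-- `find` is characterised by its spec (first index where sub is a prefix of the drop)
theorem pv_find_eq_iff (d sub : List Char) (k : Nat) :
    PySem.Chars.find d sub = (k : Int) ↔
      (sub <+: d.drop k ∧ ∀ i < k, ¬ sub <+: d.drop i) := by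
  constructor
  · intro h
    have h0 : 0 ≤ PySem.Chars.find d sub := by omega
    have := PySem.Chars.find_spec h0
    rw [h] at this; simpa using this
  · rintro ⟨hpre, hmin⟩
    have hinf : sub <:+: d :=
      (PySem.Chars.isIn_iff_infix sub d).mp
        ((PySem.Chars.exists_prefix_drop_iff_isIn sub d).mp ⟨k, hpre⟩)
    have hne : PySem.Chars.find d sub ≠ -1 :=
      (PySem.Chars.find_ne_neg_one_iff d sub).mpr hinf
    have hge : -1 ≤ PySem.Chars.find d sub := PySem.Chars.neg_one_le_find d sub
    have h0 : 0 ≤ PySem.Chars.find d sub := by omega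
    have hs := PySem.Chars.find_spec h0
    set q := (PySem.Chars.find d sub).toNat with hq
    rcases lt_trichotomy q k with hlt | heq | hgt
    · exact absurd hs.1 (hmin q hlt)
    · omega
    · exact absurd hpre (hs.2 k hgt)

-- single-character find on a cons cell
theorem pv_find_single_cons (c c' : Char) (t : List Char) :
    PySem.Chars.find (c' :: t) [c] =
      if c' = c then 0
      else if PySem.Chars.find t [c] = -1 then -1
      else 1 + PySem.Chars.find t [c] := by
  by_cases hcc : c' = c
  · subst hcc
    rw [if_pos rfl]
    have : PySem.Chars.find (c' :: t) [c'] = ((0 : Nat) : Int) := by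
      rw [pv_find_eq_iff]
      constructor
      · simp
      · omega
    simpa using this
  · simp only [if_neg hcc]
    by_cases hnf : PySem.Chars.find t [c] = -1
    · simp only [if_pos hnf]
      rw [PySem.Chars.find_eq_neg_one_iff] at hnf ⊢
      intro habs
      have := (PySem.Chars.isIn_iff_infix [c] (c' :: t)).mpr habs
      obtain ⟨j, hj⟩ := (PySem.Chars.exists_prefix_drop_iff_isIn [c] (c' :: t)).mpr this
      cases j with
      | zero =>
        simp only [List.drop_zero] at hj
        exact hcc (List.cons_prefix_cons.mp hj).1.symm
      | succ j' =>
        exact hnf <| (PySem.Chars.isIn_iff_infix [c] t).mp <|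
          (PySem.Chars.exists_prefix_drop_iff_isIn [c] t).mp ⟨j', by simpa using hj⟩
    · simp only [if_neg hnf]
      have hge : -1 ≤ PySem.Chars.find t [c] := PySem.Chars.neg_one_le_find t [c]
      have h0 : 0 ≤ PySem.Chars.find t [c] := by omega
      have hs := PySem.Chars.find_spec h0
      set p := (PySem.Chars.find t [c]).toNat with hp
      have : PySem.Chars.find (c' :: t) [c] = ((p + 1 : Nat) : Int) := by
        rw [pv_find_eq_iff]
        refine ⟨by simpa using hs.1, ?_⟩
        intro i hi
        cases i with
        | zero =>
          simp only [List.drop_zero]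
          intro habs
          exact hcc (List.cons_prefix_cons.mp habs).1.symm
        | succ i' =>
          have := hs.2 i' (by omega)
          simpa using this
      rw [this]; omega

-- a minimum-tracking fold never increases its accumulator
theorem pvFold_le_init (seps d : List Char) (e : Int) :
    seps.foldl (pvStep d) e ≤ e := by
  induction seps generalizing e with
  | nil => simp
  | cons a rest ih =>
    simp only [List.foldl]
    refine le_trans (ih _) ?_
    dsimp only [pvStep]
    split_ifs <;> omega

-- the fold is bounded by any found separator position
theorem pvFold_le_find (seps d : List Char) (c : Char) :
    ∀ e : Int, c ∈ seps → 0 ≤ PySem.Chars.find d [c] →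
      seps.foldl (pvStep d) e ≤ PySem.Chars.find d [c] := by
  induction seps with
  | nil => intro e hc _; simp at hc
  | cons a rest ih =>
    intro e hc h0
    simp only [List.foldl]
    rcases List.mem_cons.mp hc with h | h
    · subst h
      refine le_trans (pvFold_le_init rest d _) ?_
      dsimp only [pvStep]
      rw [if_pos (by omega)]
      omega
    · exact ih _ h h0

-- the fold stays nonnegative
theorem pvF_nonneg (d : List Char) (e : Int) (he : 0 ≤ e) : 0 ≤ pvF d e := by
  unfold pvF pvStep
  have h := fun c => PySem.Chars.neg_one_le_find d [c]
  simp only [pvSeps, List.foldl]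
  split_ifs <;> omega

-- a separator at the head pins the fold to ≤ 0
theorem pvF_head_sep (c' : Char) (t : List Char) (e : Int) (h : pvIsSep c' = true) :
    pvF (c' :: t) e ≤ 0 := by
  have hmem : c' ∈ pvSeps := by
    simp only [pvIsSep, Bool.or_eq_true, decide_eq_true_eq] at h
    simp only [pvSeps, List.mem_cons, List.not_mem_nil, or_false]
    tauto
  have hf : PySem.Chars.find (c' :: t) [c'] = 0 := by
    rw [pv_find_single_cons, if_pos rfl]
  have := pvFold_le_find pvSeps (c' :: t) c' e hmem (by rw [hf])
  rw [hf] at this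
  exact this

-- a non-separator head shifts the fold by one
theorem pvF_head_nonsep (c' : Char) (t : List Char) (e : Int) (h : pvIsSep c' = false) :
    pvF (c' :: t) (1 + e) = 1 + pvF t e := by
  unfold pvF pvStep
  simp only [pvIsSep, Bool.or_eq_false_iff, decide_eq_false_iff_not] at h
  obtain ⟨⟨⟨⟨⟨h1, h2⟩, h3⟩, h4⟩, h5⟩, h6⟩ := h
  simp only [pvSeps, List.foldl, pv_find_single_cons]
  have hg := fun c => PySem.Chars.neg_one_le_find t [c]
  rw [if_neg h1, if_neg h2, if_neg h3, if_neg h4, if_neg h5, if_neg h6]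
  have step : ∀ (c : Char) (a : Int),
      (if (if PySem.Chars.find t [c] = -1 then -1 else 1 + PySem.Chars.find t [c]) ≥ 0
        then min (1 + a) (if PySem.Chars.find t [c] = -1 then -1 else 1 + PySem.Chars.find t [c])
        else 1 + a)
      = 1 + (if PySem.Chars.find t [c] ≥ 0 then min a (PySem.Chars.find t [c]) else a) := by
    intro c a
    have := PySem.Chars.neg_one_le_find t [c]
    split_ifs <;> omega
  rw [step ' ' e, step '\t' _, step '>' _, step ']' _, step ';' _, step ',' _]

-- main induction: taking A's minimum-position prefix is B's scan
theorem pv_take_eq_scan (d : List Char) :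
    d.take (pvF d (d.length : Int)).toNat = pvScanB d := by
  induction d with
  | nil => simp [pvScanB]
  | cons c' t ih =>
    by_cases hs : pvIsSep c' = true
    · have h0 : pvF (c' :: t) ((c' :: t).length : Int) = 0 :=
        le_antisymm (pvF_head_sep c' t _ hs) (pvF_nonneg (c' :: t) _ (by positivity))
      rw [h0]
      simp [pvScanB, hs]
    · have hs' : pvIsSep c' = false := by simpa using hs
      have hlen : ((c' :: t).length : Int) = 1 + (t.length : Int) := by
        simp; omega
      rw [hlen, pvF_head_nonsep c' t _ hs']
      have hge := pvF_nonneg t (t.length : Int) (by positivity)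
      have htn : (1 + pvF t (t.length : Int)).toNat = (pvF t (t.length : Int)).toNat + 1 := by
        omega
      rw [htn, List.take_succ_cons, ih]
      simp [pvScanB, hs']

-- A's absolute fold equals start plus the relative fold
theorem pvF_shift (l : List Char) (s : Nat) (hsl : s ≤ l.length) :
    [" ", "\t", ">", "]", ";", ","].foldl
      (fun e sep =>
        let pos := PySem.Chars.findFrom l sep.toList (s : Int) none
        if pos ≥ 0 then min e pos else e)
      ((l.length : Int))
    = (s : Int) + pvF (l.drop s) ((l.drop s).length : Int) := by
  have hffrom : ∀ sub : List Char, PySem.Chars.findFrom l sub (s : Int) none =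
      if PySem.Chars.find (l.drop s) sub = -1 then -1
      else (s : Int) + PySem.Chars.find (l.drop s) sub :=
    fun sub => PySem.Chars.findFrom_natCast l sub s hsl
  have hlen : (l.length : Int) = (s : Int) + ((l.drop s).length : Int) := by
    simp; omega
  unfold pvF pvStep
  simp only [pvSeps, List.foldl, hffrom]
  have step : ∀ (c : Char) (a : Int),
      (if (if PySem.Chars.find (l.drop s) [c] = -1 then -1
            else (s : Int) + PySem.Chars.find (l.drop s) [c]) ≥ 0
        then min ((s : Int) + a)
          (if PySem.Chars.find (l.drop s) [c] = -1 then -1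
            else (s : Int) + PySem.Chars.find (l.drop s) [c])
        else (s : Int) + a)
      = (s : Int) + (if PySem.Chars.find (l.drop s) [c] ≥ 0
          then min a (PySem.Chars.find (l.drop s) [c]) else a) := by
    intro c a
    have := PySem.Chars.neg_one_le_find (l.drop s) [c]
    split_ifs <;> omega
  rw [hlen]
  rw [show (" " : String).toList = [' '] from rfl,
      show ("\t" : String).toList = ['\t'] from rfl,
      show (">" : String).toList = ['>'] from rfl,
      show ("]" : String).toList = [']'] from rfl,
      show (";" : String).toList = [';'] from rfl,
      show ("," : String).toList = [','] from rfl]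
  rw [step ' ' _, step '\t' _, step '>' _, step ']' _, step ';' _, step ',' _]

-- ===== VERDICT (by name: the statement is the Claim_ definition above) =====
theorem extract_first_aor_py_spec : Claim_equal_extract_first_aor_py := by
  intro text _
  unfold Spec_extract_first_aor_py extract_first_aor_py extract_first_aor_py_alt
  set l := text.toList with hl
  set start := PySem.Str.find text "sip:" with hstart
  by_cases hneg : start < 0
  · simp [hneg]
  · simp only [if_neg hneg]
    have h0 : 0 ≤ start := by omega
    have hfind : start = PySem.Chars.find l "sip:".toList := by
      simp [hstart, PySem.Str.find, hl]
    have hle : start ≤ (l.length : Int) := by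
      rw [hfind]; exact PySem.Chars.find_le_length l "sip:".toList
    have hsl : start.toNat ≤ l.length := by omega
    set d := l.drop start.toNat with hd
    set m := pvF d ((d.length : Int)) with hm
    have hm0 : 0 ≤ m := pvF_nonneg d _ (by positivity)
    have hshift : ([" ", "\t", ">", "]", ";", ","].foldl
        (fun e sep =>
          let pos := PySem.Str.findFrom text sep start none
          if pos ≥ 0 then min e pos else e)
        (PySem.Str.len text)) = start + m := by
      have hcast : start = ((start.toNat : Nat) : Int) := by omega
      have := pvF_shift l start.toNat hsl
      simp only [PySem.Str.findFrom, PySem.Str.len, ← hl, ← hcast] at this ⊢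
      simp only [List.foldl] at this ⊢
      rw [this]
    rw [hshift]
    have hslice : PySem.List.slice l (some start) (some (start + m)) = d.take m.toNat := by
      rw [PySem.List.slice_toNat l h0 (by omega)]
      have : (start + m).toNat - start.toNat = m.toNat := by omega
      rw [this, ← hd]
    rw [hslice]
    have : d.take m.toNat = pvScanB d := pv_take_eq_scan d
    rw [this]
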